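-- pv_equiv track=rewrite | github.com/julianbopp/cbct-artifact-reduction | src/cbct_artifact_reduction/utils.py | getAllControlIDs
-- ===== SOURCE A (Python) =====
-- def get_scanner_from_num(num: int):
--     orig_num = num
--     scanner = ""
--     material = ""
--     implants = ""
--     fov = ""
--
--     if ((num - 1) // 20) % 4 == 0:
--         scanner = "axeos"
--     elif ((num - 1) // 20) % 4 == 1:
--         scanner = "accuitomo"
--     elif ((num - 1) // 20) % 4 == 2:
--         scanner = "planmeca"
--     elif ((num - 1) // 20) % 4 == 3:
--         scanner = "x800"
--
--     if num % 10 == 0: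
--         material = ""
--         implants = 0
--     elif (num % 10) % 3 == 1:
--         implants = 3
--     elif (num % 10) % 3 == 2:
--         implants = 2
--     elif (num % 10) % 3 == 0:
--         implants = 1
--
--     if ((num - 1) % 10) // 3 == 0:
--         material = "ti"
--     elif ((num - 1) % 10) // 3 == 1:
--         material = "tizr"
--     elif ((num - 1) % 10) // 3 == 2:
--         material = "zr"
--
--     if ((num - 1) // 10) % 2 == 0:
--         fov = "small"
--     elif ((num - 1) // 10) % 2 == 1:
--         fov = "large"
--
--     return orig_num, scanner, material, implants, fov
--
-- def getAllControlIDs(exludeIDs: list[int] | None = [41, 208]) -> list[str]: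
--     """Find all scan ID's that correspond to control images without implants in the CBCT pig jaw data.
--
--     The CBCT pig jaw dataset consists of 398 scans. The scans with the ID's 41 and 208 are missing.
--
--     Args:
--         exludeIDs (list[int], optional): List of scan ID's to exclude. Defaults to missing ID's of CBCT pig jaw data.
--     Returns:
--         list[str]: List of scan ID's that correspond to control images without implants.
--     """
--
--     if exludeIDs is None:
--         possibleIDs = [f"{f}" for f in range(1, 401)]
--     else:
--         possibleIDs = [f"{f}" for f in range(1, 401) if f not in exludeIDs]
--
--     controlIDs: list[str] = []
--     for id in possibleIDs:
--         scanner = get_scanner_from_num(int(id))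
--         if scanner[3] == 0:
--             controlIDs.append(id)
--
--     return controlIDs
-- ===== SOURCE B (Python) =====
-- def getAllControlIDs(exludeIDs: list[int] | None = [41, 208]) -> list[str]:
--     """Control scans are exactly the IDs that are multiples of 10 in 1..400."""
--     return [str(f) for f in range(10, 401, 10)
--             if exludeIDs is None or f not in exludeIDs]
-- ===== Notes on version B (the rewrite author's own statement) =====
-- stated objective: faster
-- what changed: B enumerates the 40 multiples of 10 in 1..400 directly instead of generating all 400 IDs, stringifying each, re-parsing the string and running the scanner/material/implants/fov classifier to test implants == 0.
import Mathlib
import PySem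

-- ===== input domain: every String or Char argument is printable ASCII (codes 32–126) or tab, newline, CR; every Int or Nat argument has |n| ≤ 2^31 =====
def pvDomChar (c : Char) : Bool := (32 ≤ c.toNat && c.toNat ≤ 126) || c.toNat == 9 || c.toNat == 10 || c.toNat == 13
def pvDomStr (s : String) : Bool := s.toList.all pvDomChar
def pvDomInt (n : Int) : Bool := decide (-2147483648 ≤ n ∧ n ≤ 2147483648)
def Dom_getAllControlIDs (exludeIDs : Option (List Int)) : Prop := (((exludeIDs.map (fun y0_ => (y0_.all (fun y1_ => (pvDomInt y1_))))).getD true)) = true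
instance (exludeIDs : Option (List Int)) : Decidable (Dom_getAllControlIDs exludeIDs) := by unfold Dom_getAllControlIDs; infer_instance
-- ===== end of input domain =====

-- B replaces A's generate-all-400-IDs-and-classify loop by direct enumeration of the
-- 40 multiples of 10 in 1..400 (objective: faster by a constant factor).


-- ===== PORT A =====
-- literal transliteration of get_scanner_from_num; the if-chains are total on Int,
-- so the final 'else' defaults (the Python initial values "" / 0) are unreachable for implants
def get_scanner_from_num (num : Int) : Int × String × String × Int × String :=
  let orig_num := num
  let scanner : String :=
    if PySem.Int.mod (PySem.Int.floordiv (num - 1) 20) 4 == 0 then "axeos"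
    else if PySem.Int.mod (PySem.Int.floordiv (num - 1) 20) 4 == 1 then "accuitomo"
    else if PySem.Int.mod (PySem.Int.floordiv (num - 1) 20) 4 == 2 then "planmeca"
    else if PySem.Int.mod (PySem.Int.floordiv (num - 1) 20) 4 == 3 then "x800"
    else ""
  -- second if-statement: sets material (to "") only in its first branch, and implants in all
  let material0 : String := if PySem.Int.mod num 10 == 0 then "" else ""
  let implants : Int :=
    if PySem.Int.mod num 10 == 0 then 0
    else if PySem.Int.mod (PySem.Int.mod num 10) 3 == 1 then 3
    else if PySem.Int.mod (PySem.Int.mod num 10) 3 == 2 then 2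
    else if PySem.Int.mod (PySem.Int.mod num 10) 3 == 0 then 1
    else 0
  let material : String :=
    if PySem.Int.floordiv (PySem.Int.mod (num - 1) 10) 3 == 0 then "ti"
    else if PySem.Int.floordiv (PySem.Int.mod (num - 1) 10) 3 == 1 then "tizr"
    else if PySem.Int.floordiv (PySem.Int.mod (num - 1) 10) 3 == 2 then "zr"
    else material0
  let fov : String :=
    if PySem.Int.mod (PySem.Int.floordiv (num - 1) 10) 2 == 0 then "small"
    else if PySem.Int.mod (PySem.Int.floordiv (num - 1) 10) 2 == 1 then "large"
    else ""
  (orig_num, scanner, material, implants, fov)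

def getAllControlIDs (exludeIDs : Option (List Int)) : List String :=
  let possibleIDs : List String :=
    match exludeIDs with
    | none => (PySem.List.pyRange 1 401 1).map (fun f => PySem.Int.toStr f)
    | some l => ((PySem.List.pyRange 1 401 1).filter (fun f => !(l.contains f))).map
        (fun f => PySem.Int.toStr f)
  -- int(id) never raises here (every id is str(f) for an integer f), so getD 0 is exact
  possibleIDs.foldl (fun controlIDs id =>
    let scanner := get_scanner_from_num ((PySem.Int.ofStr? id).getD 0)
    if scanner.2.2.2.1 == 0 then controlIDs ++ [id] else controlIDs) []

-- ===== PORT B =====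
def getAllControlIDs_alt (exludeIDs : Option (List Int)) : List String :=
  ((PySem.List.pyRange 10 401 10).filter (fun f =>
      match exludeIDs with
      | none => true
      | some l => !(l.contains f))).map (fun f => PySem.Int.toStr f)

-- ===== PRECONDITION & SPEC =====
def Spec_getAllControlIDs (exludeIDs : Option (List Int)) (out : List String) : Prop := out = getAllControlIDs_alt exludeIDs
instance (exludeIDs : Option (List Int)) (out : List String) : Decidable (Spec_getAllControlIDs exludeIDs out) := by unfold Spec_getAllControlIDs; infer_instance

-- ===== CLAIM (what is proved, stated in full; the proofs are below) =====
def Claim_equal_getAllControlIDs : Prop := ∀ (exludeIDs : Option (List Int)), Dom_getAllControlIDs exludeIDs → Spec_getAllControlIDs exludeIDs (getAllControlIDs exludeIDs)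

-- ===== LEMMAS AND PROOFS =====

-- the string test A applies to an id, as a predicate on the underlying integer
def pvImpl0 (f : Int) : Bool :=
  (get_scanner_from_num ((PySem.Int.ofStr? (PySem.Int.toStr f)).getD 0)).2.2.2.1 == 0

-- the heart of the equivalence: filtering 1..400 by A's implants-test leaves exactly 10,20,…,400
set_option maxHeartbeats 4000000 in
theorem pvFilter_key :
    (PySem.List.pyRange 1 401 1).filter pvImpl0 = PySem.List.pyRange 10 401 10 := by
  decide

theorem pvFilter_comm (p q : Int → Bool) (l : List Int) :
    (l.filter p).filter q = (l.filter q).filter p := by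
  simp only [List.filter_filter]
  exact List.filter_congr (fun a _ => Bool.and_comm (q a) (p a))

theorem getAllControlIDs_spec' (exludeIDs : Option (List Int)) :
    getAllControlIDs exludeIDs = getAllControlIDs_alt exludeIDs := by
  unfold getAllControlIDs getAllControlIDs_alt
  cases exludeIDs with
  | none =>
      simp only [PySem.List.foldl_append_if_eq_filter, List.nil_append,
        List.filter_map]
      rw [show ((fun id => (get_scanner_from_num ((PySem.Int.ofStr? id).getD 0)).2.2.2.1 == 0) ∘
            fun f => PySem.Int.toStr f) = pvImpl0 from rfl, pvFilter_key]
      simp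
  | some l =>
      simp only [PySem.List.foldl_append_if_eq_filter, List.nil_append,
        List.filter_map]
      rw [show ((fun id => (get_scanner_from_num ((PySem.Int.ofStr? id).getD 0)).2.2.2.1 == 0) ∘
            fun f => PySem.Int.toStr f) = pvImpl0 from rfl]
      rw [pvFilter_comm, pvFilter_key]

-- ===== VERDICT (by name: the statement is the Claim_ definition above) =====
theorem getAllControlIDs_spec : Claim_equal_getAllControlIDs := by
  intro exludeIDs _
  unfold Spec_getAllControlIDs
  exact getAllControlIDs_spec' exludeIDs
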